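-- pv_equiv track=rewrite | github.com/ReversecLabs/spikee | spikee/attacks/adaptive_rsa.py | find_tokens_longest_prefix
-- ===== SOURCE A (Python) =====
-- def find_tokens_longest_prefix(output_text: str, output_tokens: list[str], target: str) -> list[int]:
--   """
--   Return token indices covering the LONGEST PREFIX of `target` that appears
--   contiguously in `output_text`.
--
--   This implementation searches for prefixes target[:k] (for k = len(target) .. 1).
--   It does NOT search for arbitrary internal substrings.
--   The first (longest) prefix found in the text is used.
--
--   For the located prefix substring:
--     - Tokens are selected from the first token overlapping the substring start
--       through the last token overlapping the substring end.
--     - If the FULL target is matched (k == len(target)):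
--         Extra trailing characters inside the final token are permitted (they are
--         NOT trimmed).
--     - If ONLY a shorter prefix is matched:
--         The last token is trimmed logically by excluding it if its character
--         range extends beyond the end of the matched prefix (i.e., we avoid
--         including extra characters beyond the matched prefix). Practically this
--         is done by backing off one token if necessary.
--
--   Returns:
--     - [] if no character of the target prefix appears (i.e., no prefix match).
--     - Otherwise a contiguous ascending list of token indices.
--
--   Edge cases:
--     - Empty target ("") returns [] (loop does not execute).
--     - Ambiguities (start/end computation failures) return [].
--
--   Rationale vs tests:
--     - A case like target="abcdeXYZ" and text="abc def ..." returns only the token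
--       containing "abc" because the space + 'd' breaks the contiguous prefix
--       (space not in target at that position, and 'f' not in prefix "abcde").
--   """
--
--   # TODO raise ValueError on malformed inputs
--
--   # Try progressively shorter substrings starting from the full target
--   for length in range(len(target), 0, -1):
--     substring = target[:length]
--     target_start_pos = output_text.find(substring)
--
--     if target_start_pos == -1:
--       continue
--
--     target_end_pos = target_start_pos + len(substring)
--
--     # Build per-token start/end character positions
--     positions: list[tuple[int, int]] = []
--     c_pos = 0
--     for token in output_tokens:
--       token_start = c_pos
--       token_end = c_pos + len(token)
--       positions.append((token_start, token_end))
--       c_pos = token_end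
--
--     # find first token that overlaps the substring start
--     start_token_index = -1
--     for i, (ts, te) in enumerate(positions):
--       if te > target_start_pos:
--         start_token_index = i
--         break
--
--     # find last token that overlaps the substring end
--     end_token_index = -1
--     for i, (ts, te) in enumerate(positions):
--       if ts < target_end_pos:
--         end_token_index = i
--       else:
--         break
--
--     # If we matched a shorter substring than the full target,
--     # do not include an end token that extends past the substring end.
--     if length < len(target) and end_token_index != -1:
--       ts, te = positions[end_token_index]
--       if te > target_end_pos:
--         end_token_index -= 1
--
--     if start_token_index == -1 or end_token_index == -1 or start_token_index > end_token_index: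
--       return []
--
--     return list(range(start_token_index, end_token_index + 1))
--
--   # If no substring is found, return empty list
--   return []
-- ===== SOURCE B (Python) =====
-- def find_tokens_longest_prefix(output_text: str, output_tokens: list[str], target: str) -> list[int]:
--     # Binary search the longest prefix length k of `target` present in `output_text`
--     # (presence of target[:k] is monotone in k), then map the matched span to token
--     # indices in ONE pass over the tokens instead of building a positions list and
--     # scanning it three times per candidate length.
--     lo, hi = 0, len(target)
--     while lo < hi:
--         mid = (lo + hi + 1) // 2
--         if target[:mid] in output_text:
--             lo = mid
--         else:
--             hi = mid - 1
--     k = lo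
--     if k == 0:
--         return []
--     s = output_text.find(target[:k])
--     e = s + k
--     start_idx = -1
--     end_idx = -1
--     end_e = -1
--     c = 0
--     for i, tok in enumerate(output_tokens):
--         nc = c + len(tok)
--         if start_idx == -1 and nc > s:
--             start_idx = i
--         if c < e:
--             end_idx = i
--             end_e = nc
--         c = nc
--     if k < len(target) and end_idx != -1 and end_e > e:
--         end_idx -= 1
--     if start_idx == -1 or end_idx == -1 or start_idx > end_idx:
--         return []
--     return list(range(start_idx, end_idx + 1))
-- ===== Notes on version B (the rewrite author's own statement) =====
-- stated objective: faster
-- what changed: Replaces the descending linear scan over prefix lengths with a binary search over the (monotone) presence of target[:k] in the text, and replaces building the per-token positions list plus three separate scans with a single fold over the tokens that tracks the start index, end index and end offset at once.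
import Mathlib
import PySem

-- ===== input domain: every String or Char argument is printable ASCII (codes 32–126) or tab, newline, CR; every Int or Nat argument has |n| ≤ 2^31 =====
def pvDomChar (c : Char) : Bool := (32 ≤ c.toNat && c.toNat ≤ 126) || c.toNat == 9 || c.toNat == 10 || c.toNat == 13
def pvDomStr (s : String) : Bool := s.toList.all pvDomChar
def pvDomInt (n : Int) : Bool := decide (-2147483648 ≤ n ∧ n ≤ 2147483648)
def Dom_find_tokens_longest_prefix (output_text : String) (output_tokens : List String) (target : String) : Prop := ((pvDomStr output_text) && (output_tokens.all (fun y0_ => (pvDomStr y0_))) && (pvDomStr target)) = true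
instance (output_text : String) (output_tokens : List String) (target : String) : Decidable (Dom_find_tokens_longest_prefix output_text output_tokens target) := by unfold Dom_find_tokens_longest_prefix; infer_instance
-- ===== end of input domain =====

-- B replaces A's descending linear scan over prefix lengths by a binary search (presence of
-- target[:k] in the text is monotone in k) and A's positions list + three scans by one fold
-- over the tokens; equivalence of the return values is proved on the whole domain.

-- ===== PORT A =====
-- find first token that overlaps the substring start (loop with break)
def ftlpA_findStart (pos : Int) : List (Int × Int × Int) → Int
  | [] => -1
  | (i, _, te) :: rest => if te > pos then i else ftlpA_findStart pos rest

-- find last token that overlaps the substring end (loop with else-break)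
def ftlpA_findEnd (pos acc : Int) : List (Int × Int × Int) → Int
  | [] => acc
  | (i, ts, _) :: rest => if ts < pos then ftlpA_findEnd pos i rest else acc

-- the body of A's outer loop after 'if target_start_pos == -1: continue'
def ftlpA_body (output_text : String) (output_tokens : List String) (target : String) (length : Int) : List Int :=
  let substring := PySem.Str.slice target none (some length)
  let target_start_pos := PySem.Str.find output_text substring
  let target_end_pos := target_start_pos + PySem.Str.len substring
  let positions := (output_tokens.foldl (fun (st : List (Int × Int) × Int) token =>
      (st.1 ++ [(st.2, st.2 + PySem.Str.len token)], st.2 + PySem.Str.len token)) ([], 0)).1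
  let start_token_index := ftlpA_findStart target_start_pos (PySem.List.enumerate positions)
  let end_token_index := ftlpA_findEnd target_end_pos (-1) (PySem.List.enumerate positions)
  let end_token_index :=
    if length < PySem.Str.len target ∧ end_token_index ≠ -1 then
      if (PySem.List.pyGetD positions end_token_index (0, 0)).2 > target_end_pos
      then end_token_index - 1 else end_token_index
    else end_token_index
  if start_token_index = -1 ∨ end_token_index = -1 ∨ start_token_index > end_token_index then []
  else PySem.List.pyRange start_token_index (end_token_index + 1) 1

-- 'for length in range(len(target), 0, -1)' with early return
def ftlpA_loop (output_text : String) (output_tokens : List String) (target : String) : List Int → List Int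
  | [] => []
  | length :: rest =>
    if PySem.Str.find output_text (PySem.Str.slice target none (some length)) = -1
    then ftlpA_loop output_text output_tokens target rest
    else ftlpA_body output_text output_tokens target length

def find_tokens_longest_prefix (output_text : String) (output_tokens : List String) (target : String) : List Int :=
  ftlpA_loop output_text output_tokens target (PySem.List.pyRange (PySem.Str.len target) 0 (-1))

-- ===== PORT B =====
-- the body of Source B's 'for i, tok in enumerate(output_tokens)' loop; state (start_idx, end_idx, end_e, c)
def ftlpB_step (s e : Int) (st : Int × Int × Int × Int) (p : Int × String) : Int × Int × Int × Int :=
  let nc := st.2.2.2 + PySem.Str.len p.2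
  ( if st.1 = -1 ∧ nc > s then p.1 else st.1
  , if st.2.2.2 < e then p.1 else st.2.1
  , if st.2.2.2 < e then nc else st.2.2.1
  , nc )

-- Source B's 'while lo < hi' binary search
def ftlpB_search (output_text target : String) (lo hi : Int) : Int :=
  if lo < hi then
    let mid := PySem.Int.floordiv (lo + hi + 1) 2
    if PySem.Str.isIn (PySem.Str.slice target none (some mid)) output_text
    then ftlpB_search output_text target mid hi
    else ftlpB_search output_text target lo (mid - 1)
  else lo
termination_by (hi - lo).toNat
decreasing_by
  · have h2 : PySem.Int.floordiv (lo + hi + 1) 2 = (lo + hi + 1) / 2 :=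
      PySem.Int.floordiv_eq_ediv_of_pos (by omega)
    omega
  · have h2 : PySem.Int.floordiv (lo + hi + 1) 2 = (lo + hi + 1) / 2 :=
      PySem.Int.floordiv_eq_ediv_of_pos (by omega)
    omega

def find_tokens_longest_prefix_alt (output_text : String) (output_tokens : List String) (target : String) : List Int :=
  let k := ftlpB_search output_text target 0 (PySem.Str.len target)
  if k = 0 then []
  else
    let s := PySem.Str.find output_text (PySem.Str.slice target none (some k))
    let e := s + k
    let st := (PySem.List.enumerate output_tokens).foldl (ftlpB_step s e) (-1, -1, -1, 0)
    let start_idx := st.1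
    let end_idx :=
      if k < PySem.Str.len target ∧ st.2.1 ≠ -1 ∧ st.2.2.1 > e then st.2.1 - 1 else st.2.1
    if start_idx = -1 ∨ end_idx = -1 ∨ start_idx > end_idx then []
    else PySem.List.pyRange start_idx (end_idx + 1) 1

-- ===== PRECONDITION & SPEC =====
def Spec_find_tokens_longest_prefix (output_text : String) (output_tokens : List String) (target : String) (out : List Int) : Prop := out = find_tokens_longest_prefix_alt output_text output_tokens target
instance (output_text : String) (output_tokens : List String) (target : String) (out : List Int) : Decidable (Spec_find_tokens_longest_prefix output_text output_tokens target out) := by unfold Spec_find_tokens_longest_prefix; infer_instance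

-- ===== CLAIM (what is proved, stated in full; the proofs are below) =====
def Claim_equal_find_tokens_longest_prefix : Prop := ∀ (output_text : String) (output_tokens : List String) (target : String), Dom_find_tokens_longest_prefix output_text output_tokens target → Spec_find_tokens_longest_prefix output_text output_tokens target (find_tokens_longest_prefix output_text output_tokens target)

-- ===== LEMMAS AND PROOFS =====

-- 'target[:k] occurs in output_text', as a condition on an Int length k
def ftlpPresent (output_text target : String) (k : Int) : Prop :=
  (target.toList.take k.toNat) <:+: output_text.toList

theorem ftlpPresent_mono (output_text target : String) {j k : Int}
    (hjk : j ≤ k) (h : ftlpPresent output_text target k) : ftlpPresent output_text target j := by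
  unfold ftlpPresent at *
  exact List.IsInfix.trans (List.take_prefix_take_left (by omega : j.toNat ≤ k.toNat)).isInfix h

theorem ftlpPresent_zero (output_text target : String) : ftlpPresent output_text target 0 := by
  simp [ftlpPresent]

-- find ≠ -1 on target[:k] (0 ≤ k) is exactly ftlpPresent
theorem ftlpSliceTake (target : String) (k : Int) (hk : 0 ≤ k) :
    (PySem.Str.slice target none (some k)).toList = target.toList.take k.toNat := by
  rw [PySem.Str.toList_slice]
  exact PySem.List.slice_to _ hk

theorem ftlpFind_iff (output_text target : String) (k : Int) (hk : 0 ≤ k) :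
    PySem.Str.find output_text (PySem.Str.slice target none (some k)) ≠ -1 ↔
      ftlpPresent output_text target k := by
  rw [PySem.Str.find_eq, ftlpSliceTake target k hk]
  exact PySem.Chars.find_ne_neg_one_iff _ _

theorem ftlpIsIn_iff (output_text target : String) (k : Int) (hk : 0 ≤ k) :
    PySem.Str.isIn (PySem.Str.slice target none (some k)) output_text = true ↔
      ftlpPresent output_text target k := by
  rw [PySem.Str.isIn_eq, ftlpSliceTake target k hk]
  exact PySem.Chars.isIn_iff_infix _ _

-- the binary search returns the largest k in [lo, hi] with ftlpPresent, given the invariant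
theorem ftlpB_search_spec (output_text target : String) (N : Int) :
    ∀ (lo hi : Int), 0 ≤ lo → lo ≤ hi →
    ftlpPresent output_text target lo →
    (∀ j : Int, hi < j → j ≤ N → ¬ ftlpPresent output_text target j) →
    let r := ftlpB_search output_text target lo hi
    lo ≤ r ∧ r ≤ hi ∧ ftlpPresent output_text target r ∧
      (∀ j : Int, r < j → j ≤ N → ¬ ftlpPresent output_text target j) := by
  intro lo hi
  induction lo, hi using ftlpB_search.induct output_text target with
  | case1 lo hi hlt mid hin ih =>
    intro h0 _ _ hub
    have hmm : mid = PySem.Int.floordiv (lo + hi + 1) 2 := rfl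
    rw [hmm] at hin ih
    have hmid : PySem.Int.floordiv (lo + hi + 1) 2 = (lo + hi + 1) / 2 :=
      PySem.Int.floordiv_eq_ediv_of_pos (by omega)
    have hpm : ftlpPresent output_text target (PySem.Int.floordiv (lo + hi + 1) 2) :=
      (ftlpIsIn_iff output_text target _ (by omega)).mp hin
    have := ih (by omega) (by omega) hpm hub
    rw [ftlpB_search, if_pos hlt]
    simp only [hin, if_pos]
    refine ⟨by omega, this.2.1, this.2.2⟩
  | case2 lo hi hlt mid hin ih =>
    intro h0 _ hpre hub
    have hmm : mid = PySem.Int.floordiv (lo + hi + 1) 2 := rfl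
    rw [hmm] at hin ih
    have hmid : PySem.Int.floordiv (lo + hi + 1) 2 = (lo + hi + 1) / 2 :=
      PySem.Int.floordiv_eq_ediv_of_pos (by omega)
    have hnpm : ¬ ftlpPresent output_text target (PySem.Int.floordiv (lo + hi + 1) 2) :=
      fun h => hin ((ftlpIsIn_iff output_text target _ (by omega)).mpr h)
    have hub' : ∀ j : Int, PySem.Int.floordiv (lo + hi + 1) 2 - 1 < j →
        j ≤ N → ¬ ftlpPresent output_text target j := by
      intro j hj hjN hpj
      by_cases hjh : hi < j
      · exact hub j hjh hjN hpj
      · exact hnpm (ftlpPresent_mono output_text target (by omega) hpj)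
    have := ih h0 (by omega) hpre hub'
    rw [ftlpB_search, if_pos hlt]
    simp only [hin, if_neg, Bool.false_eq_true, not_false_eq_true]
    refine ⟨this.1, by omega, this.2.2⟩
  | case3 lo hi hnlt =>
    intro h0 hlh hpre hub
    rw [ftlpB_search, if_neg hnlt]
    exact ⟨le_refl lo, hlh, hpre, fun j hj hjN => hub j (by omega) hjN⟩

-- ---- token mapping: closed-form positions list ----
def ftlpPos (c : Int) : List String → List (Int × Int)
  | [] => []
  | t :: ts => (c, c + PySem.Str.len t) :: ftlpPos (c + PySem.Str.len t) ts

theorem ftlpPos_foldl (toks : List String) :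
    ∀ (acc : List (Int × Int)) (c : Int),
    toks.foldl (fun (st : List (Int × Int) × Int) token =>
      (st.1 ++ [(st.2, st.2 + PySem.Str.len token)], st.2 + PySem.Str.len token)) (acc, c)
    = (acc ++ ftlpPos c toks, c + ((toks.map PySem.Str.len).sum)) := by
  induction toks with
  | nil => simp [ftlpPos]
  | cons t ts ih =>
    intro acc c
    simp only [List.foldl_cons, ih, ftlpPos]
    simp [List.append_assoc, add_assoc]


-- B's fold start component = A's start scan
theorem ftlpStart_eq (s e : Int) (toks : List String) :
    ∀ (i c si ei ee : Int), 0 ≤ i →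
    ((PySem.List.enumerate toks i).foldl (ftlpB_step s e) (si, ei, ee, c)).1
      = if si = -1 then ftlpA_findStart s (PySem.List.enumerate (ftlpPos c toks) i) else si := by
  induction toks with
  | nil =>
    intro i c si ei ee hi
    simp only [PySem.List.enumerate_nil, ftlpPos, List.foldl_nil, ftlpA_findStart]
    by_cases h : si = -1 <;> simp [h]
  | cons t ts ih =>
    intro i c si ei ee hi
    rw [PySem.List.enumerate_cons]
    simp only [List.foldl_cons]
    rw [ih (i+1) _ _ _ _ (by omega)]
    simp only [ftlpPos, PySem.List.enumerate_cons, ftlpA_findStart, ftlpB_step]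
    set F := ftlpA_findStart s
      (PySem.List.enumerate (ftlpPos (c + PySem.Str.len t) ts) (i + 1)) with hF
    split_ifs <;> omega


-- A-style end scan carrying the end offset
def ftlpEndPair (pos : Int) (acc : Int × Int) : List (Int × Int × Int) → Int × Int
  | [] => acc
  | (i, ts, te) :: rest => if ts < pos then ftlpEndPair pos (i, te) rest else acc

theorem ftlpEndPair_fst (pos : Int) :
    ∀ (l : List (Int × Int × Int)) (acc : Int × Int),
    (ftlpEndPair pos acc l).1 = ftlpA_findEnd pos acc.1 l := by
  intro l
  induction l with
  | nil => intro acc; rfl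
  | cons p rest ih =>
    intro acc
    obtain ⟨i, ts, te⟩ := p
    simp only [ftlpEndPair, ftlpA_findEnd]
    split <;> simp [ih]

theorem ftlpLenNonneg (t : String) : 0 ≤ PySem.Str.len t := by
  rw [PySem.Str.len_eq]; positivity


-- once c ≥ e the fold freezes the end components
theorem ftlpFrozen (s e : Int) (toks : List String) :
    ∀ (i c si ei ee : Int), e ≤ c →
    (((PySem.List.enumerate toks i).foldl (ftlpB_step s e) (si, ei, ee, c)).2.1,
     ((PySem.List.enumerate toks i).foldl (ftlpB_step s e) (si, ei, ee, c)).2.2.1) = (ei, ee) := by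
  induction toks with
  | nil => intro i c si ei ee h; simp [PySem.List.enumerate_nil]
  | cons t ts ih =>
    intro i c si ei ee h
    rw [PySem.List.enumerate_cons]
    simp only [List.foldl_cons, ftlpB_step]
    have hlt := ftlpLenNonneg t
    simp only [if_neg (show ¬ c < e from by omega)]
    exact ih (i+1) _ _ _ _ (by omega)


-- B's fold end components = A-style end scan with offsets
theorem ftlpEnd_eq (s e : Int) (toks : List String) :
    ∀ (i c si ei ee : Int),
    (((PySem.List.enumerate toks i).foldl (ftlpB_step s e) (si, ei, ee, c)).2.1,
     ((PySem.List.enumerate toks i).foldl (ftlpB_step s e) (si, ei, ee, c)).2.2.1)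
      = ftlpEndPair e (ei, ee) (PySem.List.enumerate (ftlpPos c toks) i) := by
  induction toks with
  | nil => intro i c si ei ee; simp [PySem.List.enumerate_nil, ftlpPos, ftlpEndPair]
  | cons t ts ih =>
    intro i c si ei ee
    rw [PySem.List.enumerate_cons]
    simp only [List.foldl_cons, ftlpB_step, ftlpPos, PySem.List.enumerate_cons, ftlpEndPair]
    have hlt := ftlpLenNonneg t
    by_cases hce : c < e
    · simp only [if_pos hce]
      exact ih (i+1) _ _ _ _
    · simp only [if_neg hce]
      exact ftlpFrozen s e ts (i+1) _ _ _ _ (by omega)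


-- the end scan's index is valid and its offset is that entry's snd
def ftlpInv (P : List (Int × Int)) (acc : Int × Int) : Prop :=
  acc.1 = -1 ∨ (0 ≤ acc.1 ∧ ∃ h : acc.1.toNat < P.length, (P[acc.1.toNat]).2 = acc.2)

theorem ftlpEndPair_inv (e : Int) (P : List (Int × Int)) :
    ∀ (n : Nat) (j : Nat) (acc : Int × Int), P.length - j ≤ n → ftlpInv P acc →
    ftlpInv P (ftlpEndPair e acc (PySem.List.enumerate (P.drop j) (j : Int))) := by
  intro n
  induction n with
  | zero =>
    intro j acc hn hinv
    rw [List.drop_eq_nil_of_le (by omega)]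
    simpa [PySem.List.enumerate_nil, ftlpEndPair] using hinv
  | succ n ih =>
    intro j acc hn hinv
    by_cases hj : j < P.length
    · rw [List.drop_eq_getElem_cons hj, PySem.List.enumerate_cons]
      simp only [ftlpEndPair]
      split
      · have : ((j : Int) + 1) = ((j + 1 : Nat) : Int) := by push_cast; ring
        rw [this]
        apply ih (j+1) _ (by omega)
        right
        refine ⟨by positivity, by simpa using hj, by simp⟩
      · exact hinv
    · rw [List.drop_eq_nil_of_le (by omega)]
      simpa [PySem.List.enumerate_nil, ftlpEndPair] using hinv


-- the bodies agree at any admissible length k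
theorem ftlpBody_eq (output_text : String) (toks : List String) (target : String) (k : Int)
    (hk0 : 0 < k) (hkn : k ≤ PySem.Str.len target) :
    ftlpA_body output_text toks target k =
      (let s := PySem.Str.find output_text (PySem.Str.slice target none (some k))
       let e := s + k
       let st := (PySem.List.enumerate toks).foldl (ftlpB_step s e) (-1, -1, -1, 0)
       let start_idx := st.1
       let end_idx :=
         if k < PySem.Str.len target ∧ st.2.1 ≠ -1 ∧ st.2.2.1 > e then st.2.1 - 1 else st.2.1
       if start_idx = -1 ∨ end_idx = -1 ∨ start_idx > end_idx then []
       else PySem.List.pyRange start_idx (end_idx + 1) 1) := by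
  have hlen : PySem.Str.len (PySem.Str.slice target none (some k)) = k := by
    rw [PySem.Str.len_eq, ftlpSliceTake target k (by omega)]
    have htl : PySem.Str.len target = (target.toList.length : Int) := PySem.Str.len_eq target
    rw [List.length_take, min_eq_left (by omega)]
    omega
  simp only [ftlpA_body]
  rw [ftlpPos_foldl toks [] 0, hlen]
  set s := PySem.Str.find output_text (PySem.Str.slice target none (some k)) with hs
  set e := s + k with he
  set P := ftlpPos 0 toks with hP
  simp only [List.nil_append]
  have hstart : ((PySem.List.enumerate toks 0).foldl (ftlpB_step s e) (-1, -1, -1, 0)).1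
      = ftlpA_findStart s (PySem.List.enumerate P 0) := by
    rw [ftlpStart_eq s e toks 0 0 (-1) (-1) (-1) le_rfl]
    simp [hP]
  have hend := ftlpEnd_eq s e toks 0 0 (-1) (-1) (-1)
  have hend1 : ((PySem.List.enumerate toks 0).foldl (ftlpB_step s e) (-1, -1, -1, 0)).2.1
      = (ftlpEndPair e (-1, -1) (PySem.List.enumerate P 0)).1 := congrArg Prod.fst hend
  have hend2 : ((PySem.List.enumerate toks 0).foldl (ftlpB_step s e) (-1, -1, -1, 0)).2.2.1
      = (ftlpEndPair e (-1, -1) (PySem.List.enumerate P 0)).2 := congrArg Prod.snd hend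
  have hfste := ftlpEndPair_fst e (PySem.List.enumerate P 0) (-1, -1)
  have hinv : ftlpInv P (ftlpEndPair e (-1, -1) (PySem.List.enumerate P 0)) := by
    have := ftlpEndPair_inv e P P.length 0 (-1, -1) (by omega) (Or.inl rfl)
    simpa using this
  rw [hstart, hend1, hend2, hfste]
  set startA := ftlpA_findStart s (PySem.List.enumerate P 0) with hsa
  set endA := ftlpA_findEnd e (-1) (PySem.List.enumerate P 0) with hea
  unfold ftlpInv at hinv
  rw [hfste] at hinv
  have htrim : (if k < PySem.Str.len target ∧ endA ≠ -1 then
        if (PySem.List.pyGetD P endA (0, 0)).2 > e then endA - 1 else endA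
      else endA)
      = (if k < PySem.Str.len target ∧ endA ≠ -1 ∧
            (ftlpEndPair e (-1, -1) (PySem.List.enumerate P 0)).2 > e then endA - 1
         else endA) := by
    by_cases hc1 : k < PySem.Str.len target
    · by_cases hc2 : endA = -1
      · rw [if_neg (by tauto), if_neg (by tauto)]
      · rcases hinv with h | ⟨h0, hlt, hPe⟩
        · exact absurd h hc2
        · have hget : PySem.List.pyGetD P endA (0, 0) = P[endA.toNat] :=
            PySem.List.pyGetD_eq_getElem P (0, 0) h0 (by omega)
          rw [if_pos (show k < PySem.Str.len target ∧ endA ≠ -1 from ⟨hc1, hc2⟩),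
            hget, hPe]
          by_cases hgt : (ftlpEndPair e (-1, -1) (PySem.List.enumerate P 0)).2 > e
          · rw [if_pos hgt, if_pos (show k < PySem.Str.len target ∧ endA ≠ -1 ∧
              (ftlpEndPair e (-1, -1) (PySem.List.enumerate P 0)).2 > e from ⟨hc1, hc2, hgt⟩)]
          · rw [if_neg hgt, if_neg (by tauto)]
    · rw [if_neg (by tauto), if_neg (by tauto)]
  rw [htrim]

-- A's countdown loop in terms of the maximal present length
theorem ftlpA_loop_eq (output_text : String) (toks : List String) (target : String) (K : Int)
    (hK0 : 0 ≤ K) (hKP : ftlpPresent output_text target K)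
    (hKmax : ∀ j : Int, K < j → j ≤ PySem.Str.len target → ¬ ftlpPresent output_text target j) :
    ∀ (a : Int), K ≤ a → a ≤ PySem.Str.len target →
    ftlpA_loop output_text toks target (PySem.List.pyRange a 0 (-1))
      = if K = 0 then [] else ftlpA_body output_text toks target K := by
  suffices h : ∀ (m : Nat) (a : Int), a.toNat = m → K ≤ a → a ≤ PySem.Str.len target →
      ftlpA_loop output_text toks target (PySem.List.pyRange a 0 (-1))
        = if K = 0 then [] else ftlpA_body output_text toks target K by
    intro a ha hale
    exact h a.toNat a rfl ha hale
  intro m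
  induction m with
  | zero =>
    intro a hm ha _
    have ha0 : a = 0 := by omega
    subst ha0
    rw [PySem.List.pyRange_neg_one_eq_nil le_rfl]
    simp only [ftlpA_loop]
    rw [if_pos (by omega)]
  | succ m ih =>
    intro a hm ha hale
    have hpos : (0 : Int) < a := by omega
    rw [PySem.List.pyRange_neg_one_cons hpos]
    simp only [ftlpA_loop]
    by_cases hpa : ftlpPresent output_text target a
    · have hfind := (ftlpFind_iff output_text target a (by omega)).mpr hpa
      rw [if_neg hfind]
      have haK : a = K := by
        by_contra hne
        exact hKmax a (by omega) hale hpa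
      rw [if_neg (by omega), haK]
    · have hfind : PySem.Str.find output_text (PySem.Str.slice target none (some a)) = -1 := by
        by_contra h
        exact hpa ((ftlpFind_iff output_text target a (by omega)).mp h)
      rw [if_pos hfind]
      have hKa : K ≠ a := fun h => hpa (h ▸ hKP)
      exact ih (a - 1) (by omega) (by omega) (by omega)

-- ===== VERDICT (by name: the statement is the Claim_ definition above) =====
theorem find_tokens_longest_prefix_spec : Claim_equal_find_tokens_longest_prefix := by
  unfold Claim_equal_find_tokens_longest_prefix
  intro output_text output_tokens target _hdom
  unfold Spec_find_tokens_longest_prefix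
  have hn : 0 ≤ PySem.Str.len target := ftlpLenNonneg target
  have hsp := ftlpB_search_spec output_text target (PySem.Str.len target) 0
    (PySem.Str.len target) le_rfl hn (ftlpPresent_zero output_text target)
    (fun j hj hjN _ => absurd hjN (by omega))
  simp only at hsp
  obtain ⟨hK0, hKn, hKP, hKmax⟩ := hsp
  show ftlpA_loop output_text output_tokens target
      (PySem.List.pyRange (PySem.Str.len target) 0 (-1)) = _
  rw [ftlpA_loop_eq output_text output_tokens target
    (ftlpB_search output_text target 0 (PySem.Str.len target)) hK0 hKP hKmax
    (PySem.Str.len target) hKn le_rfl]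
  simp only [find_tokens_longest_prefix_alt]
  by_cases hz : ftlpB_search output_text target 0 (PySem.Str.len target) = 0
  · rw [if_pos hz, if_pos hz]
  · rw [if_neg hz, if_neg hz]
    exact ftlpBody_eq output_text output_tokens target _ (by omega) hKn
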